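-- pv_equiv track=rewrite | github.com/gc-content/recombite | recombite_mp.py | local_td_max
-- ===== SOURCE A (Python) =====
-- def local_td_max(haplotype_string, window_size):
--     """Calculates the maximum phase switch count in windows of the haplotype string, where each window only counts real (non-'x') characters."""
--
--     # Filter out 'x' characters and create a list of indices for valid windows
--     real_positions = [i for i, char in enumerate(haplotype_string) if char != 'x']
--
--     # If there aren't enough real positions to form a window, calculate transitions for the entire sequence
--     if len(real_positions) < window_size:
--         transition_count = 0
--         previous_char = None
--
--         for i in real_positions:
--             char = haplotype_string[i]
--             if previous_char and char != previous_char: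
--                 transition_count += 1  # Count transition
--             previous_char = char
--
--         return transition_count
--
--     # Initialize list to store transition counts for each valid window
--     transitions = []
--
--     # Slide the "window" across the real positions only
--     for start in range(len(real_positions) - window_size + 1):
--         window_indices = real_positions[start:start + window_size]  # Indices of the current window
--         transition_count = 0
--         previous_char = haplotype_string[window_indices[0]]  # Start with the first character in the window
--
--         # Count transitions within the window
--         for idx in window_indices[1:]:
--             char = haplotype_string[idx]
--             if char != previous_char:
--                 transition_count += 1
--             previous_char = char
--
--         transitions.append(transition_count)
--
--     # Return the maximum transition count found in any window
--     return max(transitions) if transitions else 0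
-- ===== SOURCE B (Python) =====
-- def local_td_max(haplotype_string, window_size):
--     """Maximum phase-switch count over sliding windows of real (non-'x') positions,
--     via a prefix-sum of adjacent-pair transition indicators: each window in O(1)."""
--     reals = [c for c in haplotype_string if c != 'x']
--     n = len(reals)
--     # pre[k] = number of transitions among the first k real characters
--     pre = [0] * n if n else [0]
--     for i in range(1, n):
--         pre[i] = pre[i - 1] + (1 if reals[i] != reals[i - 1] else 0)
--     if n < window_size:
--         return pre[-1]
--     return max(pre[k + window_size - 1] - pre[k] for k in range(n - window_size + 1))
-- ===== Notes on version B (the rewrite author's own statement) =====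
-- stated objective: faster
-- what changed: B filters the real characters once and builds a prefix-sum array of adjacent-pair transition indicators, so each window's transition count is one O(1) subtraction instead of A's full rescan of every window.
import Mathlib
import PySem

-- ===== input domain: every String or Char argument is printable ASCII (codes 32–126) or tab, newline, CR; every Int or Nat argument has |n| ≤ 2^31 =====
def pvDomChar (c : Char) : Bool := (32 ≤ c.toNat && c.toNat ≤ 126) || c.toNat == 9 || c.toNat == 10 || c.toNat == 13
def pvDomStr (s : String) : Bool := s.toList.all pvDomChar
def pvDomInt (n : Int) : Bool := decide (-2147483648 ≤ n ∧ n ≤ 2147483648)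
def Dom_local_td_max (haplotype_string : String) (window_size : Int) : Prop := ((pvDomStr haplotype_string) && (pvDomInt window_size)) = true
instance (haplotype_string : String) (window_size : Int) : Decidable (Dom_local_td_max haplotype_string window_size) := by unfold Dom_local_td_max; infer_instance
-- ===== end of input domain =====

-- B replaces A's per-window rescan by a prefix-sum of adjacent-pair transition indicators (O(1) per window); measurably faster.
-- A raises IndexError for window_size <= 0 (an empty index window), so Pre_ requires 1 <= window_size.


-- ===== PORT A =====
def local_td_max (haplotype_string : String) (window_size : Int) : Int :=
  let cs := haplotype_string.toList
  let real_positions : List Int :=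
    (PySem.List.enumerate cs 0).filterMap (fun p => if p.2 ≠ 'x' then some p.1 else none)
  if (real_positions.length : Int) < window_size then
    (real_positions.foldl
      (fun (st : Int × Option Char) i =>
        let c := PySem.List.pyGetD cs i ' '
        match st.2 with
        | none => (st.1, some c)
        | some p => (if c ≠ p then st.1 + 1 else st.1, some c))
      (0, none)).1
  else
    let transitions : List Int :=
      (PySem.List.pyRange 0 ((real_positions.length : Int) - window_size + 1) 1).foldl
        (fun acc start =>
          let window := PySem.List.slice real_positions (some start) (some (start + window_size))
          -- window[0] is in range whenever Pre_ holds (window_size ≥ 1); the default is unreachable there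
          let prev0 := PySem.List.pyGetD cs (PySem.List.pyGetD window 0 0) ' '
          let cnt := ((PySem.List.slice window (some 1) none).foldl
            (fun (st : Int × Char) idx =>
              let c := PySem.List.pyGetD cs idx ' '
              (if c ≠ st.2 then st.1 + 1 else st.1, c))
            (0, prev0)).1
          acc ++ [cnt])
        []
    match PySem.List.max? transitions (fun y => y) with
    | some m => m
    | none => 0

-- ===== PORT B =====
def local_td_max_alt (haplotype_string : String) (window_size : Int) : Int :=
  let reals := haplotype_string.toList.filter (fun c => c ≠ 'x')
  let n : Int := (reals.length : Int)
  let pre : List Int :=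
    (PySem.List.pyRange 1 n 1).foldl
      (fun pre i =>
        pre ++ [PySem.List.pyGetD pre (-1) 0 +
          (if PySem.List.pyGetD reals i ' ' ≠ PySem.List.pyGetD reals (i - 1) ' ' then 1 else 0)])
      [0]
  if n < window_size then
    PySem.List.pyGetD pre (-1) 0
  else
    match PySem.List.max? ((PySem.List.pyRange 0 (n - window_size + 1) 1).map
        (fun k => PySem.List.pyGetD pre (k + window_size - 1) 0 - PySem.List.pyGetD pre k 0))
        (fun y => y) with
    | some m => m
    | none => 0

-- ===== PRECONDITION & SPEC =====
-- A raises IndexError whenever window_size ≤ 0 (it then reads element 0 of an empty window slice).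
def Pre_local_td_max (haplotype_string : String) (window_size : Int) : Prop := 1 ≤ window_size
instance (haplotype_string : String) (window_size : Int) : Decidable (Pre_local_td_max haplotype_string window_size) := by unfold Pre_local_td_max; infer_instance
def pvWitness_local_td_max : String × Int := ("aaxbba", 2)

def Spec_local_td_max (haplotype_string : String) (window_size : Int) (out : Int) : Prop := out = local_td_max_alt haplotype_string window_size
instance (haplotype_string : String) (window_size : Int) (out : Int) : Decidable (Spec_local_td_max haplotype_string window_size out) := by unfold Spec_local_td_max; infer_instance

-- ===== CLAIM (what is proved, stated in full; the proofs are below) =====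
def Claim_equal_local_td_max : Prop := ∀ (haplotype_string : String) (window_size : Int), Dom_local_td_max haplotype_string window_size → Pre_local_td_max haplotype_string window_size → Spec_local_td_max haplotype_string window_size (local_td_max haplotype_string window_size)

-- ===== LEMMAS AND PROOFS =====

def stepC : Int × Char → Char → Int × Char :=
  fun st c => (if c ≠ st.2 then st.1 + 1 else st.1, c)

def stepO : Int × Option Char → Char → Int × Option Char :=
  fun st c =>
    match st.2 with
    | none => (st.1, some c)
    | some p => (if c ≠ p then st.1 + 1 else st.1, some c)

def tc : List Char → Int
  | [] => 0
  | [_] => 0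
  | a :: b :: t => (if b ≠ a then 1 else 0) + tc (b :: t)

lemma foldA (rest : List Char) : ∀ (acc : Int) (p : Char),
    (rest.foldl stepC (acc, p)).1
      = acc + tc (p :: rest) := by
  induction rest with
  | nil => intro acc p; simp [tc]
  | cons c rest ih =>
      intro acc p
      simp only [List.foldl_cons, stepC]
      rw [ih]
      simp only [tc]
      split_ifs <;> ring

lemma foldAO (rest : List Char) : ∀ (acc : Int) (p : Char),
    (rest.foldl stepO (acc, some p)).1
      = acc + tc (p :: rest) := by
  induction rest with
  | nil => intro acc p; simp [tc]
  | cons c rest ih =>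
      intro acc p
      simp only [List.foldl_cons, stepO]
      rw [ih]
      simp only [tc]
      split_ifs <;> ring

lemma foldA0 (L : List Char) :
    (L.foldl stepO (0, none)).1 = tc L := by
  cases L with
  | nil => simp [tc]
  | cons c t =>
      simp only [List.foldl_cons, stepO]
      rw [foldAO]
      simp

lemma tc_append_cons (xs : List Char) : ∀ (y : Char) (ys : List Char),
    tc (xs ++ y :: ys) = tc (xs ++ [y]) + tc (y :: ys) := by
  induction xs with
  | nil => intro y ys; simp [tc]
  | cons x t ih =>
      intro y ys
      cases t with
      | nil => simp [tc]
      | cons z t' =>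
          simp only [List.cons_append, tc] at *
          rw [ih]
          ring

lemma mapl (cs : List Char) : ∀ (pref : List Char),
    (((PySem.List.enumerate cs (pref.length : Int)).filterMap
        (fun p => if p.2 ≠ 'x' then some p.1 else none)).map
      (fun i => PySem.List.pyGetD (pref ++ cs) i ' '))
    = cs.filter (fun c => c ≠ 'x') := by
  induction cs with
  | nil => intro pref; simp [PySem.List.enumerate_nil]
  | cons c cs ih =>
      intro pref
      rw [PySem.List.enumerate_cons]
      have hih := ih (pref ++ [c])
      have hlen : (((pref ++ [c]).length : Nat) : Int) = (pref.length : Int) + 1 := by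
        simp
      rw [hlen, List.append_assoc, List.singleton_append] at hih
      by_cases h : c = 'x'
      · subst h
        rw [List.filterMap_cons_none (by simp)]
        rw [hih]
        simp
      · have hfm : List.filterMap (fun (p : Int × Char) => if p.2 ≠ 'x' then some p.1 else none)
            ((((pref.length : Nat) : Int), c) :: PySem.List.enumerate cs ((pref.length : Int) + 1))
            = ((pref.length : Nat) : Int) :: List.filterMap (fun (p : Int × Char) => if p.2 ≠ 'x' then some p.1 else none) (PySem.List.enumerate cs ((pref.length : Int) + 1)) := by
          simp [h]
        rw [hfm, List.map_cons]
        have hget : PySem.List.pyGetD (pref ++ c :: cs) ((pref.length : Nat) : Int) ' ' = c := by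
          rw [PySem.List.pyGetD_natCast]
          simp [List.getD]
        rw [hget, hih]
        simp [h]

lemma tc_take_one (R : List Char) : tc (R.take 1) = 0 := by
  cases R <;> simp [tc]

lemma tc_pair (a b : Char) : tc [a, b] = (if b ≠ a then 1 else 0) := by
  simp [tc]

lemma tc_take_succ (R : List Char) (j : Nat) (h : j + 2 ≤ R.length) :
    tc (R.take (j + 2)) = tc (R.take (j + 1)) +
      (if R.getD (j + 1) ' ' ≠ R.getD j ' ' then 1 else 0) := by
  have h1 : j < R.length := by omega
  have h2 : j + 1 < R.length := by omega
  have e1 : R.take (j + 1) = R.take j ++ [R[j]] := by rw [← List.take_concat_get h1, List.concat_eq_append]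
  have e2 : R.take (j + 2) = R.take (j + 1) ++ [R[j + 1]] := by rw [← List.take_concat_get h2, List.concat_eq_append]
  rw [e2, e1, List.append_assoc, List.singleton_append, tc_append_cons, ← e1, tc_pair]
  simp [List.getD, List.getElem?_eq_getElem h1, List.getElem?_eq_getElem h2]

lemma tc_window (R : List Char) (k v : Nat) (h : k + (v + 1) ≤ R.length) :
    tc ((R.drop k).take (v + 1)) = tc (R.take (k + (v + 1))) - tc (R.take (k + 1)) := by
  have hk : k < R.length := by omega
  have hdrop : R.drop k = R[k] :: R.drop (k + 1) := List.drop_eq_getElem_cons hk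
  have e1 : R.take (k + 1) = R.take k ++ [R[k]] := by rw [← List.take_concat_get hk, List.concat_eq_append]
  have e2 : R.take (k + (v + 1)) = R.take k ++ R[k] :: (R.drop (k + 1)).take v := by
    rw [List.take_add, hdrop, List.take_succ_cons]
  rw [e2, tc_append_cons, ← e1, hdrop, List.take_succ_cons]
  ring

-- proof-side names for the ports' components
def gch (cs : List Char) (i : Int) : Char := PySem.List.pyGetD cs i ' '

def rpos (cs : List Char) : List Int :=
  (PySem.List.enumerate cs 0).filterMap (fun p => if p.2 ≠ 'x' then some p.1 else none)

def Awin (cs : List Char) (rp : List Int) (w start : Int) : Int :=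
  ((PySem.List.slice (PySem.List.slice rp (some start) (some (start + w))) (some 1) none).foldl
     (fun st idx => stepC st (gch cs idx))
     (0, gch cs (PySem.List.pyGetD (PySem.List.slice rp (some start) (some (start + w))) 0 0))).1

def Aimpl (h : String) (w : Int) : Int :=
  if (((rpos h.toList).length : Int)) < w then
    ((rpos h.toList).foldl (fun st i => stepO st (gch h.toList i)) (0, none)).1
  else
    match PySem.List.max? ((PySem.List.pyRange 0 (((rpos h.toList).length : Int) - w + 1) 1).foldl
        (fun acc start => acc ++ [Awin h.toList (rpos h.toList) w start]) []) (fun y => y) with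
    | some m => m
    | none => 0

def indstep (R : List Char) : List Int → Int → List Int :=
  fun pre i => pre ++ [PySem.List.pyGetD pre (-1) 0 +
    (if PySem.List.pyGetD R i ' ' ≠ PySem.List.pyGetD R (i - 1) ' ' then 1 else 0)]

def Bpre (R : List Char) (n : Int) : List Int :=
  (PySem.List.pyRange 1 n 1).foldl (indstep R) [0]

def Bimpl (h : String) (w : Int) : Int :=
  if (((h.toList.filter (fun c => c ≠ 'x')).length : Int)) < w then
    PySem.List.pyGetD
      (Bpre (h.toList.filter (fun c => c ≠ 'x')) (((h.toList.filter (fun c => c ≠ 'x')).length : Int))) (-1) 0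
  else
    match PySem.List.max? ((PySem.List.pyRange 0 ((((h.toList.filter (fun c => c ≠ 'x')).length : Int)) - w + 1) 1).map
        (fun k => PySem.List.pyGetD (Bpre (h.toList.filter (fun c => c ≠ 'x')) (((h.toList.filter (fun c => c ≠ 'x')).length : Int))) (k + w - 1) 0
          - PySem.List.pyGetD (Bpre (h.toList.filter (fun c => c ≠ 'x')) (((h.toList.filter (fun c => c ≠ 'x')).length : Int))) k 0))
        (fun y => y) with
    | some m => m
    | none => 0

lemma A_eq (h : String) (w : Int) : local_td_max h w = Aimpl h w := rfl

lemma B_eq (h : String) (w : Int) : local_td_max_alt h w = Bimpl h w := rfl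

lemma pyGetD_map_range {α : Type} (f : Nat → α) (d : α) (n : Nat) (j : Int)
    (h0 : 0 ≤ j) (h1 : j < (n : Int)) :
    PySem.List.pyGetD ((List.range n).map f) j d = f j.toNat := by
  have hlt : j.toNat < n := by omega
  rw [show j = ((j.toNat : Nat) : Int) by omega, PySem.List.pyGetD_natCast]
  simp [List.getD, hlt]
  congr 1
  omega

lemma Bpre_char (R : List Char) : ∀ (m : Nat), 1 ≤ m → m ≤ R.length →
    Bpre R (m : Int) = (List.range m).map (fun k => tc (R.take (k + 1))) := by
  intro m
  induction m with
  | zero => intro h; omega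
  | succ j ih =>
    intro _ hle
    rcases Nat.eq_zero_or_pos j with hj | hj
    · subst hj
      unfold Bpre
      rw [PySem.List.pyRange_one_eq_nil (by norm_num)]
      simp [List.range_one, tc_take_one]
    · have hle' : j ≤ R.length := by omega
      have hcast : ((j + 1 : Nat) : Int) = (j : Int) + 1 := by push_cast; ring
      unfold Bpre at *
      rw [hcast, PySem.List.pyRange_one_succ_right (by exact_mod_cast hj), List.foldl_append,
        ih hj hle']
      obtain ⟨v, rfl⟩ : ∃ v, j = v + 1 := ⟨j - 1, by omega⟩
      have hv2 : v + 2 ≤ R.length := by omega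
      rw [List.range_succ (n := v + 1), List.map_append, List.map_singleton,
        List.foldl_cons, List.foldl_nil]
      unfold indstep
      congr 1
      congr 1
      rw [List.range_succ, List.map_append, List.map_singleton,
        PySem.List.pyGetD_neg_one_append_singleton]
      have c2 : ((v + 1 : Nat) : Int) - 1 = ((v : Nat) : Int) := by push_cast; ring
      rw [c2, PySem.List.pyGetD_natCast, PySem.List.pyGetD_natCast]
      rw [tc_take_succ R v hv2]
lemma Blast (R : List Char) :
    PySem.List.pyGetD (Bpre R (R.length : Int)) (-1) 0 = tc R := by
  cases hR : R.length with
  | zero =>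
    have : R = [] := List.length_eq_zero_iff.mp hR
    subst this
    unfold Bpre
    rw [PySem.List.pyRange_one_eq_nil (by norm_num)]
    simp only [List.foldl_nil]
    decide
  | succ n =>
    rw [Bpre_char R (n + 1) (by omega) (by omega)]
    rw [List.range_succ, List.map_append, List.map_singleton,
      PySem.List.pyGetD_neg_one_append_singleton]
    rw [show n + 1 = R.length from hR.symm, List.take_length]

lemma map_rpos (cs : List Char) :
    (rpos cs).map (gch cs) = cs.filter (fun c => c ≠ 'x') := by
  have := mapl cs []
  simpa [rpos, gch] using this

lemma len_rpos (cs : List Char) :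
    (rpos cs).length = (cs.filter (fun c => c ≠ 'x')).length := by
  conv_rhs => rw [← map_rpos cs]
  simp

lemma Awin_eq (cs : List Char) (w start : Int) (hw : 1 ≤ w) (hs : 0 ≤ start)
    (hend : start + w ≤ ((cs.filter (fun c => c ≠ 'x')).length : Int)) :
    Awin cs (rpos cs) w start
      = tc (((cs.filter (fun c => c ≠ 'x')).drop start.toNat).take w.toNat) := by
  have hmap := map_rpos cs
  have hlen := len_rpos cs
  have h0 : 0 ≤ start + w := by omega
  have hslice : PySem.List.slice (rpos cs) (some start) (some (start + w))
      = ((rpos cs).drop start.toNat).take w.toNat := by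
    rw [PySem.List.slice_toNat _ hs h0]
    congr 1
    omega
  have hnlen : start.toNat + w.toNat ≤ (rpos cs).length := by
    rw [hlen]; omega
  have hWlen : (((rpos cs).drop start.toNat).take w.toNat).length = w.toNat := by
    simp [List.length_take, List.length_drop]
    omega
  have hWmap : (((rpos cs).drop start.toNat).take w.toNat).map (gch cs)
      = ((cs.filter (fun c => c ≠ 'x')).drop start.toNat).take w.toNat := by
    rw [List.map_take, List.map_drop, hmap]
  unfold Awin
  rw [hslice]
  cases hW : ((rpos cs).drop start.toNat).take w.toNat with
  | nil => rw [hW] at hWlen; simp at hWlen; omega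
  | cons i0 irest =>
    rw [hW] at hWmap
    rw [PySem.List.slice_from_one, List.tail_cons, PySem.List.pyGetD_zero_cons]
    rw [← List.foldl_map]
    rw [foldA]
    rw [← List.map_cons, hWmap]
    ring

lemma winterm_eq (cs : List Char) (w k : Int) (hw : 1 ≤ w) (hk0 : 0 ≤ k)
    (hk1 : k < ((cs.filter (fun c => c ≠ 'x')).length : Int) - w + 1) :
    Awin cs (rpos cs) w k
      = PySem.List.pyGetD
          ((List.range (cs.filter (fun c => c ≠ 'x')).length).map
            (fun j => tc ((cs.filter (fun c => c ≠ 'x')).take (j + 1)))) (k + w - 1) 0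
        - PySem.List.pyGetD
          ((List.range (cs.filter (fun c => c ≠ 'x')).length).map
            (fun j => tc ((cs.filter (fun c => c ≠ 'x')).take (j + 1)))) k 0 := by
  set R := cs.filter (fun c => c ≠ 'x') with hRdef
  have hend : k + w ≤ (R.length : Int) := by omega
  rw [Awin_eq cs w k hw hk0 (by omega)]
  rw [pyGetD_map_range _ _ _ (k + w - 1) (by omega) (by omega)]
  rw [pyGetD_map_range _ _ _ k (by omega) (by omega)]
  obtain ⟨v, hv⟩ : ∃ v, w.toNat = v + 1 := ⟨w.toNat - 1, by omega⟩
  have hwin : k.toNat + (v + 1) ≤ R.length := by omega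
  rw [hv, tc_window R k.toNat v hwin]
  have e1 : (k + w - 1).toNat + 1 = k.toNat + (v + 1) := by omega
  rw [e1]

theorem AB_agree (h : String) (w : Int) (hw : 1 ≤ w) : Aimpl h w = Bimpl h w := by
  unfold Aimpl Bimpl
  have hmap := map_rpos h.toList
  have hlen := len_rpos h.toList
  set cs := h.toList with hcs
  set R := cs.filter (fun c => c ≠ 'x') with hRdef
  rw [hlen]
  by_cases hb : ((R.length : Int)) < w
  · rw [if_pos hb, if_pos hb]
    rw [← List.foldl_map, hmap, foldA0, Blast]
  · rw [if_neg hb, if_neg hb]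
    have h1n : 1 ≤ R.length := by omega
    rw [PySem.List.foldl_append_singleton_eq_map]
    rw [Bpre_char R R.length h1n (le_refl _)]
    have hmaps : (PySem.List.pyRange 0 ((R.length : Int) - w + 1) 1).map (Awin cs (rpos cs) w)
        = (PySem.List.pyRange 0 ((R.length : Int) - w + 1) 1).map
            (fun k => PySem.List.pyGetD ((List.range R.length).map (fun j => tc (R.take (j + 1)))) (k + w - 1) 0
              - PySem.List.pyGetD ((List.range R.length).map (fun j => tc (R.take (j + 1)))) k 0) := by
      apply List.map_congr_left
      intro k hk
      obtain ⟨hk0, hk1⟩ := PySem.List.mem_pyRange_one.mp hk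
      exact winterm_eq cs w k hw hk0 hk1
    rw [hmaps]
    rw [List.nil_append]

-- ===== VERDICT (by name: the statement is the Claim_ definition above) =====
theorem local_td_max_spec : Claim_equal_local_td_max := by
  intro h w _ hpre
  unfold Spec_local_td_max
  rw [A_eq, B_eq]
  exact AB_agree h w hpre
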